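-- pv_equiv track=rewrite | github.com/4raff/TubesAKA | trending_twitter.py | hitung_frekuensi_valid_rekursif
-- ===== SOURCE A (Python) =====
-- stopwords = {
--     'yang', 'untuk', 'dengan', 'di', 'ke', 'pada', 'adalah', 'itu', 'dan', 'tersebut',
--     'saya', 'kami', 'mereka', 'memiliki', 'menjadi', 'menyebabkan', 'menggunakan', 'untuk',
--     'seperti', 'mempunyai', 'menulis', 'berada', 'menghadapi', 'belajar', 'setiap',
--     'akan', 'sudah', 'sedang', 'dari', 'dalam', 'sebuah', 'hingga' , 'ini' , 'aku', 'hari' ,'kita', 'semoga', 'merasa', 'daerah', 'sangat', 'masyarakat', 'lebih', 'banyak', 'oleh', 'memberikan'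
-- }
--
-- def hitung_frekuensi_valid_rekursif(postingan_list, idx=0, hasil_sementara=None):
--     if hasil_sementara is None:
--         hasil_sementara = {}
--
--     if idx >= len(postingan_list):  # Basis rekursif
--         # Hanya ambil kata yang muncul di lebih dari satu postingan
--         return {kata: len(postingan_idx) for kata, postingan_idx in hasil_sementara.items() if len(postingan_idx) > 1}
--
--     # Proses postingan saat ini
--     postingan = postingan_list[idx]
--     kata_set = set([kata.strip('.,!?') for kata in postingan.lower().split() if kata.strip('.,!?') not in stopwords])
--
--     for kata in kata_set:
--         if kata not in hasil_sementara:
--             hasil_sementara[kata] = set()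
--         hasil_sementara[kata].add(idx)
--
--     # Rekursi dengan hasil akumulasi
--     return hitung_frekuensi_valid_rekursif(postingan_list, idx + 1, hasil_sementara)
-- ===== SOURCE B (Python) =====
-- stopwords = {
--     'yang', 'untuk', 'dengan', 'di', 'ke', 'pada', 'adalah', 'itu', 'dan', 'tersebut',
--     'saya', 'kami', 'mereka', 'memiliki', 'menjadi', 'menyebabkan', 'menggunakan', 'untuk',
--     'seperti', 'mempunyai', 'menulis', 'berada', 'menghadapi', 'belajar', 'setiap',
--     'akan', 'sudah', 'sedang', 'dari', 'dalam', 'sebuah', 'hingga' , 'ini' , 'aku', 'hari' ,'kita', 'semoga', 'merasa', 'daerah', 'sangat', 'masyarakat', 'lebih', 'banyak', 'oleh', 'memberikan'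
-- }
--
-- def hitung_frekuensi_valid_rekursif(postingan_list, idx=0, hasil_sementara=None):
--     # Iterative version: one loop over the remaining positions, merging each
--     # post's de-duplicated word set into the accumulator, then one comprehension.
--     acc = {} if hasil_sementara is None else hasil_sementara
--     for i in range(idx, len(postingan_list)):
--         tokens = {w.strip('.,!?') for w in postingan_list[i].lower().split()}
--         for w in tokens - stopwords:
--             acc[w] = acc.get(w, set()) | {i}
--     return {kata: len(s) for kata, s in acc.items() if len(s) > 1}
-- ===== Notes on version B (the rewrite author's own statement) =====
-- stated objective: simpler
-- what changed: Replaces the accumulator-passing recursion by a single iterative loop over the remaining positions, builds each post's word set once and subtracts the stopword set, merging via dict.get-union instead of the membership-check-then-mutate pattern.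
import Mathlib
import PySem

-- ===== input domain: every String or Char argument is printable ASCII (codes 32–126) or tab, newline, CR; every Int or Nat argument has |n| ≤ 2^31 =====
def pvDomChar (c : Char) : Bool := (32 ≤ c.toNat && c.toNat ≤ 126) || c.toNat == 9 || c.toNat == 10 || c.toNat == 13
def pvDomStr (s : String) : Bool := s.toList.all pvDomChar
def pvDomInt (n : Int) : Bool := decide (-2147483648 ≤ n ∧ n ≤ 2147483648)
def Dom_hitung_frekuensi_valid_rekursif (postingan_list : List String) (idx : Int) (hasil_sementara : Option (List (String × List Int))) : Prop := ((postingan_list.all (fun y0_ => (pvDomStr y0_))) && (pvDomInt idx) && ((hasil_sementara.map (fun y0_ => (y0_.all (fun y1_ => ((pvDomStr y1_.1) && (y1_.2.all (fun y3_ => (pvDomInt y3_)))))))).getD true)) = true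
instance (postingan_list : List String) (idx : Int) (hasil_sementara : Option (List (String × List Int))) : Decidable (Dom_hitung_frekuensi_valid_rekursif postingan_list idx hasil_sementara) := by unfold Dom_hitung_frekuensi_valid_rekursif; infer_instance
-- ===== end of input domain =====

-- ===== PORT A =====
-- B replaces A's accumulator-passing recursion by one iterative loop with a per-post
-- set difference against the stopwords; return values proved equal (A mutates the passed-in
-- accumulator dict in place, B rebinds its entries — the claim is about the return value only).

-- the module-level 'stopwords' set (used for membership only)
def pvStopwords : List String := ["yang", "untuk", "dengan", "di", "ke", "pada", "adalah", "itu", "dan", "tersebut",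
  "saya", "kami", "mereka", "memiliki", "menjadi", "menyebabkan", "menggunakan",
  "seperti", "mempunyai", "menulis", "berada", "menghadapi", "belajar", "setiap",
  "akan", "sudah", "sedang", "dari", "dalam", "sebuah", "hingga", "ini", "aku", "hari", "kita",
  "semoga", "merasa", "daerah", "sangat", "masyarakat", "lebih", "banyak", "oleh", "memberikan"]

-- 'hasil_sementara = {} if None' plus the decoding of the dict-of-sets argument
-- (a Python dict has unique keys and its set values distinct elements: Dict.ofList / Set.ofList)
def pvDecodeAcc (hasil_sementara : Option (List (String × List Int))) : PySem.Dict String (List Int) :=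
  match hasil_sementara with
  | none => PySem.Dict.empty
  | some l => PySem.Dict.ofList (l.map (fun p => (p.1, PySem.Set.ofList p.2)))

-- A's recursive worker (the Python function after the 'is None' check)
def hitungA_go (postingan_list : List String) (idx : Int) (hasil : PySem.Dict String (List Int)) :
    List (String × Int) :=
  if _hge : (postingan_list.length : Int) ≤ idx then
    -- {kata: len(v) for kata, v in hasil.items() if len(v) > 1}
    (hasil.items.filter (fun p => p.2.length > 1)).map (fun p => (p.1, (p.2.length : Int)))
  else
    match PySem.List.pyGet? postingan_list idx with
    | none => []   -- IndexError (idx < -len): excluded by Pre_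
    | some postingan =>
      let kata_set : PySem.Set String :=
        PySem.Set.ofList
          (((PySem.Str.split₀ (PySem.Str.lower postingan)).filter
              (fun kata => !(pvStopwords.contains (PySem.Str.stripChars kata ".,!?")))).map
            (fun kata => PySem.Str.stripChars kata ".,!?"))
      hitungA_go postingan_list (idx + 1)
        (kata_set.foldl
          (fun d kata =>
            (if d.contains kata then d else d.insert kata []).modify kata []
              (fun s => PySem.Set.add s idx))
          hasil)
termination_by ((postingan_list.length : Int) - idx).toNat
decreasing_by omega

def hitung_frekuensi_valid_rekursif (postingan_list : List String) (idx : Int)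
    (hasil_sementara : Option (List (String × List Int))) : List (String × Int) :=
  hitungA_go postingan_list idx (pvDecodeAcc hasil_sementara)

-- ===== PORT B =====
-- loop body: merge post i's stopword-free word set into acc
def hitungB_post (postingan_list : List String) (acc : PySem.Dict String (List Int)) (i : Int) :
    PySem.Dict String (List Int) :=
  match PySem.List.pyGet? postingan_list i with
  | none => acc   -- IndexError in the Python too (i < -len): excluded by Pre_
  | some post =>
    let tokens : PySem.Set String :=
      PySem.Set.ofList
        ((PySem.Str.split₀ (PySem.Str.lower post)).map (fun w => PySem.Str.stripChars w ".,!?"))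
    (PySem.Set.diff tokens (PySem.Set.ofList pvStopwords)).foldl
      (fun acc w => acc.insert w (PySem.Set.union (acc.getD w []) [i])) acc

def hitung_frekuensi_valid_rekursif_alt (postingan_list : List String) (idx : Int)
    (hasil_sementara : Option (List (String × List Int))) : List (String × Int) :=
  let acc := pvDecodeAcc hasil_sementara
  let acc := (PySem.List.pyRange idx postingan_list.length).foldl (hitungB_post postingan_list) acc
  (acc.items.filter (fun p => p.2.length > 1)).map (fun p => (p.1, (p.2.length : Int)))

-- ===== PRECONDITION & SPEC =====
-- Pre_ excludes exactly the inputs where the Python A raises IndexError (idx below -len(postingan_list)).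
def Pre_hitung_frekuensi_valid_rekursif (postingan_list : List String) (idx : Int)
    (_hasil_sementara : Option (List (String × List Int))) : Prop :=
  -(postingan_list.length : Int) ≤ idx
instance (postingan_list : List String) (idx : Int) (hasil_sementara : Option (List (String × List Int))) : Decidable (Pre_hitung_frekuensi_valid_rekursif postingan_list idx hasil_sementara) := by unfold Pre_hitung_frekuensi_valid_rekursif; infer_instance

def pvWitness_hitung_frekuensi_valid_rekursif : List String × Int × (Option (List (String × List Int))) :=
  (["kopi panas enak.", "kopi, dingin"], 0, none)

def Spec_hitung_frekuensi_valid_rekursif (postingan_list : List String) (idx : Int) (hasil_sementara : Option (List (String × List Int))) (out : List (String × Int)) : Prop := out = hitung_frekuensi_valid_rekursif_alt postingan_list idx hasil_sementara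
instance (postingan_list : List String) (idx : Int) (hasil_sementara : Option (List (String × List Int))) (out : List (String × Int)) : Decidable (Spec_hitung_frekuensi_valid_rekursif postingan_list idx hasil_sementara out) := by unfold Spec_hitung_frekuensi_valid_rekursif; infer_instance

-- ===== CLAIM (what is proved, stated in full; the proofs are below) =====
def Claim_equal_hitung_frekuensi_valid_rekursif : Prop := ∀ (postingan_list : List String) (idx : Int) (hasil_sementara : Option (List (String × List Int))), Dom_hitung_frekuensi_valid_rekursif postingan_list idx hasil_sementara → Pre_hitung_frekuensi_valid_rekursif postingan_list idx hasil_sementara → Spec_hitung_frekuensi_valid_rekursif postingan_list idx hasil_sementara (hitung_frekuensi_valid_rekursif postingan_list idx hasil_sementara)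

-- ===== LEMMAS AND PROOFS =====

-- set(filtered list) = set(full list) filtered: dedup and filter commute
lemma pv_ofList_filter {α : Type} [BEq α] [LawfulBEq α] (l : List α) (p : α → Bool) :
    PySem.Set.ofList (l.filter p) = (PySem.Set.ofList l).filter p := by
  induction l using List.reverseRecOn with
  | nil => rfl
  | append_singleton xs x ih =>
    rw [List.filter_append, List.filter_singleton,
      PySem.Set.ofList_append_singleton, PySem.Set.add_eq_ite]
    by_cases hp : p x
    · simp only [hp, cond_true]
      rw [PySem.Set.ofList_append_singleton, PySem.Set.add_eq_ite]
      by_cases hm : x ∈ xs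
      · have hm1 : x ∈ PySem.Set.ofList xs := (PySem.Set.mem_ofList xs x).mpr hm
        have hm2 : x ∈ PySem.Set.ofList (xs.filter p) :=
          (PySem.Set.mem_ofList _ x).mpr (List.mem_filter.mpr ⟨hm, hp⟩)
        simp [hp, hm1, ih]
      · have hm1 : x ∉ PySem.Set.ofList xs := fun h => hm ((PySem.Set.mem_ofList xs x).mp h)
        simp [hp, hm1, ih]
    · rw [Bool.not_eq_true] at hp
      simp only [hp, cond_false, List.append_nil]
      by_cases hm1 : x ∈ PySem.Set.ofList xs
      · simp [hm1, ih]
      · simp [hp, hm1, ih]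

-- A's per-post word list equals B's set difference
lemma pv_words_eq (post : String) :
    PySem.Set.ofList
        (((PySem.Str.split₀ (PySem.Str.lower post)).filter
            (fun kata => !(pvStopwords.contains (PySem.Str.stripChars kata ".,!?")))).map
          (fun kata => PySem.Str.stripChars kata ".,!?"))
      = PySem.Set.diff
          (PySem.Set.ofList
            ((PySem.Str.split₀ (PySem.Str.lower post)).map (fun w => PySem.Str.stripChars w ".,!?")))
          (PySem.Set.ofList pvStopwords) := by
  rw [show (fun kata => !pvStopwords.contains (PySem.Str.stripChars kata ".,!?"))
        = ((fun x => !pvStopwords.contains x) ∘ (fun kata : String => PySem.Str.stripChars kata ".,!?"))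
      from rfl, ← List.filter_map, pv_ofList_filter]
  show _ = PySem.Set.diff _ _
  unfold PySem.Set.diff
  apply List.filter_congr
  intro x _
  have : (PySem.Set.ofList pvStopwords).contains x = pvStopwords.contains x := by
    by_cases hx : x ∈ pvStopwords
    · simp [PySem.Set.contains_eq_listContains, hx, (PySem.Set.mem_ofList pvStopwords x).mpr hx]
    · have : x ∉ PySem.Set.ofList pvStopwords := fun h => hx ((PySem.Set.mem_ofList _ x).mp h)
      simp [PySem.Set.contains_eq_listContains, hx, this]
  rw [this]

-- A's per-word update equals B's per-word update
lemma pv_step_eq (d : PySem.Dict String (List Int)) (w : String) (i : Int) :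
    (if d.contains w then d else d.insert w []).modify w [] (fun s => PySem.Set.add s i)
      = d.insert w (PySem.Set.union (d.getD w []) [i]) := by
  have hu : ∀ s : PySem.Set Int, PySem.Set.union s [i] = PySem.Set.add s i := fun s => rfl
  rw [hu]
  by_cases hc : d.contains w
  · rw [if_pos hc]; rfl
  · have hcf : d.contains w = false := by simpa using hc
    rw [if_neg hc]
    unfold PySem.Dict.modify
    rw [PySem.Dict.getD_insert_self, PySem.Dict.getD_of_not_contains d _ hcf]
    apply PySem.Dict.ext
    rw [PySem.Dict.items_insert_of_contains (d.insert w []) _ (PySem.Dict.contains_insert_self d w []),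
      PySem.Dict.items_insert_of_not_contains d _ hcf,
      PySem.Dict.items_insert_of_not_contains d _ hcf, List.map_append]
    have hk : ∀ p ∈ d.items, p.1 ≠ w := by
      intro p hp hpw
      have := (PySem.Dict.contains_iff_mem_keys d w).mpr (hpw ▸ PySem.Dict.mem_keys_of_mem_items d hp)
      rw [this] at hcf; exact absurd hcf (by simp)
    rw [List.map_singleton]
    have : List.map (fun p : String × List Int => if (p.1 == w) = true then (w, PySem.Set.add [] i) else p) d.items = d.items := by
      conv_rhs => rw [← List.map_id d.items]
      apply List.map_congr_left
      intro p hp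
      simp [hk p hp]
    rw [this]
    simp

-- in range, pyGet? succeeds
lemma pv_pyGet?_isSome {α : Type} (xs : List α) (i : Int)
    (h1 : -(xs.length : Int) ≤ i) (h2 : i < xs.length) :
    ∃ v, PySem.List.pyGet? xs i = some v := by
  unfold PySem.List.pyGet? PySem.List.pyIdx?
  by_cases h3 : 0 ≤ i
  · have hlt : i.toNat < xs.length := by omega
    exact ⟨xs[i.toNat], by simp [h3, h2]⟩
  · have hlt : xs.length - (-i).toNat < xs.length := by omega
    exact ⟨xs[xs.length - (-i).toNat], by simp [h3, h1, List.getElem?_eq_getElem hlt]⟩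

-- A's per-post processing equals B's loop body (pyGet? succeeding)
lemma pv_body_eq (pl : List String) (i : Int) (post : String)
    (hget : PySem.List.pyGet? pl i = some post) (h : PySem.Dict String (List Int)) :
    (PySem.Set.ofList
        (((PySem.Str.split₀ (PySem.Str.lower post)).filter
            (fun kata => !(pvStopwords.contains (PySem.Str.stripChars kata ".,!?")))).map
          (fun kata => PySem.Str.stripChars kata ".,!?"))).foldl
        (fun d kata =>
          (if d.contains kata then d else d.insert kata []).modify kata []
            (fun s => PySem.Set.add s i)) h
      = hitungB_post pl h i := by
  unfold hitungB_post
  rw [hget]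
  simp only
  rw [pv_words_eq post]
  exact PySem.List.foldl_congr_mem _ _ _ h (fun d w _ => pv_step_eq d w i)

-- the main induction: A's recursion equals B's fold over the index range
lemma pv_go_eq (pl : List String) :
    ∀ (k : Nat) (idx : Int) (h : PySem.Dict String (List Int)),
      -(pl.length : Int) ≤ idx → ((pl.length : Int) - idx).toNat = k →
      hitungA_go pl idx h =
        (((PySem.List.pyRange idx pl.length).foldl (hitungB_post pl) h).items.filter
            (fun p => p.2.length > 1)).map (fun p => (p.1, (p.2.length : Int))) := by
  intro k
  induction k with
  | zero =>
    intro idx h hpre hk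
    have hge : (pl.length : Int) ≤ idx := by omega
    rw [hitungA_go, dif_pos hge, PySem.List.pyRange_one_eq_nil hge, List.foldl_nil]
  | succ n ih =>
    intro idx h hpre hk
    have hlt : idx < (pl.length : Int) := by omega
    obtain ⟨post, hget⟩ := pv_pyGet?_isSome pl idx hpre hlt
    rw [hitungA_go, dif_neg (by omega : ¬((pl.length : Int) ≤ idx)), hget]
    simp only
    rw [PySem.List.pyRange_one_cons hlt, List.foldl_cons, ← pv_body_eq pl idx post hget h]
    exact ih (idx + 1) _ (by omega) (by omega)

-- ===== VERDICT (by name: the statement is the Claim_ definition above) =====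
theorem hitung_frekuensi_valid_rekursif_spec : Claim_equal_hitung_frekuensi_valid_rekursif := by
  intro pl idx hs _hdom hpre
  unfold Spec_hitung_frekuensi_valid_rekursif hitung_frekuensi_valid_rekursif
    hitung_frekuensi_valid_rekursif_alt
  exact pv_go_eq pl (((pl.length : Int) - idx).toNat) idx (pvDecodeAcc hs) hpre rfl
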